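-- pv_equiv track=rewrite | github.com/otackiosh/Trab-Comunicacao-de-dados | emissor.py | binToAmi
-- ===== SOURCE A (Python) =====
-- def binToAmi(msgBin):
--     ami = []
--     count = 0
--     for x in range(len(msgBin)):
--         count = count%(-4)
--         if(msgBin[x] == '1'):
--             ami.append(int(msgBin[x]) + count)
--             count -= 2
--         else:
--             ami.append(0)
--     return ami
-- ===== SOURCE B (Python) =====
-- def binToAmi(msgBin):
--     ones = [i for i, c in enumerate(msgBin) if c == '1']
--     res = [0] * len(msgBin)
--     for rank, i in enumerate(ones):
--         res[i] = 1 if rank % 2 == 0 else -1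
--     return res
-- ===== Notes on version B (the rewrite author's own statement) =====
-- stated objective: alternative
-- what changed: A's single pass with a running signed count (count%(-4)) is replaced by an index-then-fill decomposition: collect the positions of '1' bits, allocate a zero-filled result, then set each such position to +1/-1 by the parity of its rank.
import Mathlib
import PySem

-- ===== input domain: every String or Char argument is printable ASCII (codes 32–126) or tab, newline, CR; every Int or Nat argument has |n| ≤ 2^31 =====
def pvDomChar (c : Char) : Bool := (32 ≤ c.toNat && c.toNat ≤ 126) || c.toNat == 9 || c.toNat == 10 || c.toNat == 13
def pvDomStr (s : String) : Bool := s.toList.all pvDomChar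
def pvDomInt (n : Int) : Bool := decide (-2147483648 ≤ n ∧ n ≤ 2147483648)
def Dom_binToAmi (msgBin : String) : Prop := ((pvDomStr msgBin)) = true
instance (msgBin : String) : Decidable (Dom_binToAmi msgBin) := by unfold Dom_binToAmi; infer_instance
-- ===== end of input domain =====

-- B replaces A's single pass with running signed state by an index-then-fill decomposition
-- (collect positions of '1', fill a zero list by rank parity); objective: alternative, same cost.

-- ===== PORT A =====
-- A's loop over range(len(msgBin)) reading msgBin[x] in order, with the appended list and
-- the running count as state (count%(-4) via PySem.Int.mod; int('1') via PySem.Int.ofStr?).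
def aLoop : List Char → List Int → Int → List Int
  | [], ami, _ => ami
  | c :: cs, ami, count =>
      let count := PySem.Int.mod count (-4)
      if c = '1' then
        aLoop cs (ami ++ [(PySem.Int.ofStr? (String.mk [c])).getD 0 + count]) (count - 2)
      else
        aLoop cs (ami ++ [0]) count

def binToAmi (msgBin : String) : List Int :=
  aLoop msgBin.toList [] 0

-- ===== PORT B =====
-- ones = [i for i, c in enumerate(msgBin) if c == '1']
-- res = [0]*len; for rank, i in enumerate(ones): res[i] = 1 if rank % 2 == 0 else -1
def bFill : List Int → List (Int × Int) → List Int
  | res, [] => res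
  | res, (rank, i) :: rest =>
      bFill (res.set i.toNat (if PySem.Int.mod rank 2 = 0 then 1 else -1)) rest

def binToAmi_alt (msgBin : String) : List Int :=
  let l := msgBin.toList
  let ones := (PySem.List.enumerate l).filterMap (fun p => if p.2 = '1' then some p.1 else none)
  bFill (List.replicate l.length 0) (PySem.List.enumerate ones)

-- ===== PRECONDITION & SPEC =====
def Spec_binToAmi (msgBin : String) (out : List Int) : Prop := out = binToAmi_alt msgBin
instance (msgBin : String) (out : List Int) : Decidable (Spec_binToAmi msgBin out) := by unfold Spec_binToAmi; infer_instance

-- ===== CLAIM (what is proved, stated in full; the proofs are below) =====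
def Claim_equal_binToAmi : Prop := ∀ (msgBin : String), Dom_binToAmi msgBin → Spec_binToAmi msgBin (binToAmi msgBin)

-- ===== LEMMAS AND PROOFS =====

-- Reference function: AMI of l where k ones have already been emitted.
def amiRef : List Char → Nat → List Int
  | [], _ => []
  | c :: cs, k =>
      if c = '1' then (if k % 2 = 0 then 1 else -1) :: amiRef cs (k + 1)
      else 0 :: amiRef cs k

lemma aLoop_eq_ref (l : List Char) : ∀ (ami : List Int) (c : Int) (k : Nat),
    PySem.Int.mod c (-4) = (if k % 2 = 0 then 0 else -2) →
    aLoop l ami c = ami ++ amiRef l k := by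
  induction l with
  | nil => intro ami c k _; simp [aLoop, amiRef]
  | cons x xs ih =>
    intro ami c k hc
    by_cases hx : x = '1'
    · subst hx
      have hone : (PySem.Int.ofStr? (String.mk ['1'])).getD 0 = 1 := by decide
      simp only [aLoop, amiRef, hc, hone]
      by_cases hk : k % 2 = 0
      · rw [if_pos hk, if_pos hk,
          ih _ _ (k + 1) (by rw [if_neg (by omega)]; decide)]
        simp
      · rw [if_neg hk, if_neg hk,
          ih _ _ (k + 1) (by rw [if_pos (by omega)]; decide)]
        simp only [List.append_assoc, List.singleton_append]
        norm_num
    · simp only [aLoop, amiRef, if_neg hx, hc]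
      rw [ih _ _ k (by split <;> decide)]
      simp

-- positions of '1' in l (as Ints, like enumerate yields), offset by start s
def onesIdx (l : List Char) (s : Int) : List Int :=
  (PySem.List.enumerate l s).filterMap (fun p => if p.2 = '1' then some p.1 else none)

lemma onesIdx_cons (c : Char) (cs : List Char) (s : Int) :
    onesIdx (c :: cs) s = (if c = '1' then [s] else []) ++ onesIdx cs (s + 1) := by
  by_cases h : c = '1' <;> simp [onesIdx, PySem.List.enumerate_cons, h]

-- shifting every target index by one acts as consing past the head
lemma bFill_shift (ps : List (Int × Int)) : ∀ (x : Int) (res : List Int),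
    (∀ p ∈ ps, 0 ≤ p.2) →
    bFill (x :: res) (ps.map (fun p => (p.1, p.2 + 1))) = x :: bFill res ps := by
  induction ps with
  | nil => intro x res _; simp [bFill]
  | cons p ps ih =>
    intro x res hpos
    obtain ⟨rank, i⟩ := p
    have hi : 0 ≤ i := hpos (rank, i) (List.mem_cons_self ..)
    have hset : ∀ v : Int, (x :: res).set (i + 1).toNat v = x :: res.set i.toNat v := by
      intro v
      have h1 : (i + 1).toNat = i.toNat + 1 := by omega
      rw [h1]; rfl
    simp only [List.map_cons, bFill, hset]
    exact ih x _ (fun q hq => hpos q (List.mem_cons_of_mem _ hq))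

lemma onesIdx_nonneg (l : List Char) : ∀ (s : Int), 0 ≤ s → ∀ i ∈ onesIdx l s, 0 ≤ i := by
  induction l with
  | nil => intro s _ i hi; simp [onesIdx] at hi
  | cons c cs ih =>
    intro s hs i hi
    rw [onesIdx_cons] at hi
    rcases List.mem_append.mp hi with h | h
    · by_cases hc : c = '1'
      · simp [hc] at h; omega
      · simp [hc] at h
    · exact ih (s + 1) (by omega) i h

-- enumerate after a map on the elements
lemma enumerate_map (f : Int → Int) (l : List Int) : ∀ (s : Int),
    PySem.List.enumerate (l.map f) s
      = (PySem.List.enumerate l s).map (fun p => (p.1, f p.2)) := by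
  induction l with
  | nil => intro s; simp [PySem.List.enumerate_nil]
  | cons x xs ih => intro s; simp [PySem.List.enumerate_cons, ih]

lemma onesIdx_shift (l : List Char) : ∀ (s : Int),
    onesIdx l (s + 1) = (onesIdx l s).map (fun i => i + 1) := by
  induction l with
  | nil => intro s; simp [onesIdx]
  | cons c cs ih =>
    intro s
    rw [onesIdx_cons, onesIdx_cons, ih (s + 1)]
    by_cases h : c = '1' <;> simp [h]

lemma mod_two_ite (k : Nat) :
    (if PySem.Int.mod (k : Int) 2 = 0 then (1 : Int) else -1)
      = (if k % 2 = 0 then 1 else -1) := by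
  rw [show (2 : Int) = ((2 : Nat) : Int) from rfl, PySem.Int.mod_natCast k 2]
  by_cases h : k % 2 = 0 <;> simp [h]
  omega

lemma snd_mem_of_mem_enumerate {α : Type} {l : List α} : ∀ {s : Int} {p : Int × α},
    p ∈ PySem.List.enumerate l s → p.2 ∈ l := by
  induction l with
  | nil => intro s p hp; simp [PySem.List.enumerate_nil] at hp
  | cons x xs ih =>
    intro s p hp
    rw [PySem.List.enumerate_cons] at hp
    rcases List.mem_cons.mp hp with h | h
    · subst h; simp
    · exact List.mem_cons_of_mem _ (ih h)

lemma bFill_eq_ref (l : List Char) : ∀ (k : Nat),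
    bFill (List.replicate l.length 0) (PySem.List.enumerate (onesIdx l 0) (k : Int))
      = amiRef l k := by
  induction l with
  | nil => intro k; simp [onesIdx, bFill, amiRef, PySem.List.enumerate_nil]
  | cons c cs ih =>
    intro k
    have hshift : onesIdx cs 1 = (onesIdx cs 0).map (fun i => i + 1) := by
      have := onesIdx_shift cs 0; simpa using this
    by_cases h : c = '1'
    · rw [onesIdx_cons, if_pos h]
      simp only [List.singleton_append, PySem.List.enumerate_cons]
      have h0 : ((0 : Int) + 1) = (1 : Int) := by norm_num
      rw [show (0:Int) + 1 = 1 from rfl] at *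
      rw [hshift, enumerate_map]
      simp only [List.length_cons, List.replicate_succ, bFill]
      have hcast : ((k : Int) + 1) = ((k + 1 : Nat) : Int) := by push_cast; ring
      rw [show ((0:Int)).toNat = 0 from rfl]
      rw [List.set_cons_zero, mod_two_ite k, hcast,
        bFill_shift _ _ _ (fun p hp =>
          onesIdx_nonneg cs 0 le_rfl _ (snd_mem_of_mem_enumerate hp)),
        ih (k + 1)]
      simp [amiRef, h]
    · rw [onesIdx_cons, if_neg h]
      simp only [List.nil_append]
      rw [show (0 : Int) + 1 = 1 from rfl, hshift, enumerate_map]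
      simp only [List.length_cons, List.replicate_succ]
      rw [bFill_shift _ _ _ (fun p hp =>
          onesIdx_nonneg cs 0 le_rfl _ (snd_mem_of_mem_enumerate hp)),
        ih k]
      simp [amiRef, h]

-- ===== VERDICT (by name: the statement is the Claim_ definition above) =====
theorem binToAmi_spec : Claim_equal_binToAmi := by
  intro msgBin _
  unfold Spec_binToAmi binToAmi binToAmi_alt
  rw [aLoop_eq_ref msgBin.toList [] 0 0 (by decide)]
  have := bFill_eq_ref msgBin.toList 0
  simpa [onesIdx] using this.symm
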